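-- pv_equiv track=rewrite | github.com/ZixuanGao23206703/BlackJack-Simulator | draft/basic_strategy.py | is_soft_hand
-- ===== SOURCE A (Python) =====
-- def is_soft_hand(hand):
--     total = 0
--     aces_count = 0
--
--     values = {
--         "ACE": 11,
--         "KING": 10,
--         "QUEEN": 10,
--         "JACK": 10
--     }
--
--     for card in hand:
--         if card['value'] == 'ACE':
--             aces_count += 1
--             total += 11
--         else:
--             total += values.get(card['value'], int(card['value']) if card['value'].isdigit() else 0)
--
--     while total > 21 and aces_count > 0:
--         total -= 10
--         aces_count -= 1
--
--     return aces_count > 0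
-- ===== SOURCE B (Python) =====
-- def is_soft_hand(hand):
--     values = {
--         "KING": 10,
--         "QUEEN": 10,
--         "JACK": 10
--     }
--     hard = 0
--     aces = 0
--     for card in hand:
--         v = card['value']
--         if v == 'ACE':
--             aces += 1
--             hard += 1
--         else:
--             hard += values.get(v, int(v) if v.isdigit() else 0)
--     return aces > 0 and hard + 10 <= 21
-- ===== Notes on version B (the rewrite author's own statement) =====
-- stated objective: simpler
-- what changed: B counts each ace as 1 in a single hard total and replaces A's demote-while-busting while-loop with the closed-form condition 'aces > 0 and hard + 10 <= 21'.
import Mathlib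
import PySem

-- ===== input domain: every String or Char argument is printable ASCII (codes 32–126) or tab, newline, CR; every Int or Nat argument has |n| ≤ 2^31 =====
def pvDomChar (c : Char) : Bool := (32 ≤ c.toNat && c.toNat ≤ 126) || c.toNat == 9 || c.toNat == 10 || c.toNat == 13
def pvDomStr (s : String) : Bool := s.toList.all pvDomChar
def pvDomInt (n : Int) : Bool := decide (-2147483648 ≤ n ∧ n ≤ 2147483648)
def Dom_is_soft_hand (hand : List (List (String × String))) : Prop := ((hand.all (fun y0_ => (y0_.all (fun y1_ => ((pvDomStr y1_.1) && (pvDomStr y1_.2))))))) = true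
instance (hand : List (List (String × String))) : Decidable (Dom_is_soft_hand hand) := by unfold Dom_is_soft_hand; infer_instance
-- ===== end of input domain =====

-- B replaces A's demote-aces-while-busting while-loop with the closed-form test
-- 'aces > 0 and hard_total + 10 <= 21' over a single hard total (aces counted as 1): simpler.


-- ===== PORT A =====
-- card['value'] : first match in the association list (Python dict lookup); Pre_ guarantees it exists,
-- so the `getD ""` default is never used inside Pre_.
def pvCardValue (card : List (String × String)) : String :=
  ((card.find? (fun p => p.1 == "value")).map Prod.snd).getD ""

-- values.get(v, int(v) if v.isdigit() else 0) for a non-ACE v (the 'values' dict minus the ACE branch)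
def pvNonAceA (v : String) : Int :=
  if v == "KING" then 10
  else if v == "QUEEN" then 10
  else if v == "JACK" then 10
  else if PySem.Str.strIsdigit v then (PySem.Int.ofStr? v).getD 0 else 0

-- the while-loop: 'while total > 21 and aces_count > 0: total -= 10; aces_count -= 1', returning aces_count
def pvDemote (total aces : Int) : Int :=
  if total > 21 ∧ aces > 0 then pvDemote (total - 10) (aces - 1) else aces
termination_by aces.toNat
decreasing_by omega

def is_soft_hand (hand : List (List (String × String))) : Bool :=
  let st := hand.foldl (fun (st : Int × Int) card =>
    let v := pvCardValue card
    if v == "ACE" then (st.1 + 11, st.2 + 1) else (st.1 + pvNonAceA v, st.2)) (0, 0)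
  decide (pvDemote st.1 st.2 > 0)

-- ===== PORT B =====
-- B's non-ACE card value is the same expression as A's; the helper is shared.
def is_soft_hand_alt (hand : List (List (String × String))) : Bool :=
  let st := hand.foldl (fun (st : Int × Int) card =>
    let v := ((card.find? (fun p => p.1 == "value")).map Prod.snd).getD ""
    if v == "ACE" then (st.1 + 1, st.2 + 1) else (st.1 + pvNonAceA v, st.2)) (0, 0)
  decide (st.2 > 0 ∧ st.1 + 10 ≤ 21)

-- ===== PRECONDITION & SPEC =====
-- Pre_ excludes exactly the hands with a card lacking a "value" key, on which A raises KeyError.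
def Pre_is_soft_hand (hand : List (List (String × String))) : Prop :=
  ∀ card ∈ hand, (card.find? (fun p => p.1 == "value")).isSome
instance (hand : List (List (String × String))) : Decidable (Pre_is_soft_hand hand) := by unfold Pre_is_soft_hand; infer_instance

def pvWitness_is_soft_hand : (List (List (String × String))) :=
  [[("value", "ACE")], [("value", "7")]]

def Spec_is_soft_hand (hand : List (List (String × String))) (out : Bool) : Prop := out = is_soft_hand_alt hand
instance (hand : List (List (String × String))) (out : Bool) : Decidable (Spec_is_soft_hand hand out) := by unfold Spec_is_soft_hand; infer_instance

-- ===== CLAIM (what is proved, stated in full; the proofs are below) =====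
def Claim_equal_is_soft_hand : Prop := ∀ (hand : List (List (String × String))), Dom_is_soft_hand hand → Pre_is_soft_hand hand → Spec_is_soft_hand hand (is_soft_hand hand)

-- ===== LEMMAS AND PROOFS =====

-- A's fold state (total, aces) vs B's fold state (hard, aces): total = hard + 10*aces, aces equal, aces ≥ 0.
theorem pv_fold_rel (hand : List (List (String × String))) (h a : Int) (ha : 0 ≤ a) :
    (hand.foldl (fun (st : Int × Int) card =>
      let v := pvCardValue card
      if v == "ACE" then (st.1 + 11, st.2 + 1) else (st.1 + pvNonAceA v, st.2)) (h + 10 * a, a)) =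
    (let st := hand.foldl (fun (st : Int × Int) card =>
      let v := ((card.find? (fun p => p.1 == "value")).map Prod.snd).getD ""
      if v == "ACE" then (st.1 + 1, st.2 + 1) else (st.1 + pvNonAceA v, st.2)) (h, a);
     (st.1 + 10 * st.2, st.2)) ∧
    0 ≤ (hand.foldl (fun (st : Int × Int) card =>
      let v := ((card.find? (fun p => p.1 == "value")).map Prod.snd).getD ""
      if v == "ACE" then (st.1 + 1, st.2 + 1) else (st.1 + pvNonAceA v, st.2)) (h, a)).2 := by
  induction hand generalizing h a with
  | nil => exact ⟨rfl, ha⟩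
  | cons c tl ih =>
    simp only [List.foldl_cons]
    by_cases hv : pvCardValue c == "ACE"
    · simp only [pvCardValue] at hv
      simp only [pvCardValue, hv, if_pos]
      have := ih (h + 1) (a + 1) (by omega)
      constructor
      · rw [(by ring : h + 10 * a + 11 = (h + 1) + 10 * (a + 1))]
        exact this.1
      · exact this.2
    · simp only [pvCardValue] at hv
      simp only [pvCardValue, hv, if_neg, Bool.false_eq_true, not_false_iff]
      have := ih (h + pvNonAceA (((c.find? (fun p => p.1 == "value")).map Prod.snd).getD "")) a ha
      constructor
      · rw [(by ring : h + 10 * a + pvNonAceA (((c.find? (fun p => p.1 == "value")).map Prod.snd).getD "") =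
            (h + pvNonAceA (((c.find? (fun p => p.1 == "value")).map Prod.snd).getD "")) + 10 * a)]
        exact this.1
      · exact this.2

-- the while-loop's final aces_count is positive iff aces > 0 and hard + 10 ≤ 21 (hard = total - 10*aces)
theorem pv_demote_pos (h a : Int) (ha : 0 ≤ a) :
    (pvDemote (h + 10 * a) a > 0) ↔ (a > 0 ∧ h + 10 ≤ 21) := by
  generalize hn : a.toNat = n
  induction n generalizing a with
  | zero =>
    have ha0 : a = 0 := by omega
    subst ha0
    rw [pvDemote]
    simp
  | succ k ih =>
    rw [pvDemote]
    by_cases hc : h + 10 * a > 21 ∧ a > 0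
    · rw [if_pos hc]
      have heq : h + 10 * a - 10 = h + 10 * (a - 1) := by ring
      rw [heq]
      rw [ih (a - 1) (by omega) (by omega)]
      omega
    · rw [if_neg hc]
      omega

-- ===== VERDICT (by name: the statement is the Claim_ definition above) =====
theorem is_soft_hand_spec : Claim_equal_is_soft_hand := by
  intro hand _ _
  unfold Spec_is_soft_hand is_soft_hand is_soft_hand_alt
  have h := pv_fold_rel hand 0 0 le_rfl
  simp only [mul_zero, add_zero] at h
  rw [h.1]
  have h2 := pv_demote_pos
    ((hand.foldl (fun (st : Int × Int) card =>
      let v := ((card.find? (fun p => p.1 == "value")).map Prod.snd).getD ""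
      if v == "ACE" then (st.1 + 1, st.2 + 1) else (st.1 + pvNonAceA v, st.2)) (0, 0)).1)
    ((hand.foldl (fun (st : Int × Int) card =>
      let v := ((card.find? (fun p => p.1 == "value")).map Prod.snd).getD ""
      if v == "ACE" then (st.1 + 1, st.2 + 1) else (st.1 + pvNonAceA v, st.2)) (0, 0)).2)
    h.2
  simp only [h2]
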